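-- pv_equiv track=rewrite | github.com/lhotanok/MeaLinker | data/resources/foodcom/datasets-preprocessing.py | appropriate_field
-- ===== SOURCE A (Python) =====
-- def words_count(whitespace_count):
--     return whitespace_count + 1
--
-- def appropriate_field(line):
--     whitespace_count = 0
--
--     for character in line:
--         if character == ',':
--             return False
--         if character == ' ':
--             whitespace_count += 1
--
--     return words_count(whitespace_count) < 6
-- ===== SOURCE B (Python) =====
-- def appropriate_field(line):
--     if ',' in line:
--         return False
--     pos = -1
--     for _ in range(5):
--         pos = line.find(' ', pos + 1)
--         if pos == -1:
--             return True
--     return False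
-- ===== Notes on version B (the rewrite author's own statement) =====
-- stated objective: faster
-- what changed: Replaces A's per-character scan with a manual space counter by a comma membership test followed by at most five str.find jumps between successive space positions, exiting as soon as no fifth space exists.
import Mathlib
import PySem

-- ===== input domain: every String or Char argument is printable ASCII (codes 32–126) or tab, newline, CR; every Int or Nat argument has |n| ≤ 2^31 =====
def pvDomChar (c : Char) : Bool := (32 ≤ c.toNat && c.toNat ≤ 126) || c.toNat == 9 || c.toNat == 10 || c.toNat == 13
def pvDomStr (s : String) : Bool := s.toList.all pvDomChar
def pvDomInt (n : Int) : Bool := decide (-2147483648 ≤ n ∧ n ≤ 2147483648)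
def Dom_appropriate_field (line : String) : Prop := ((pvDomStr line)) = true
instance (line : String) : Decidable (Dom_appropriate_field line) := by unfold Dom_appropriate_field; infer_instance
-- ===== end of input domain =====

-- B replaces A's per-character scan with a comma membership test followed by at most
-- five find-jumps between successive space positions (early exit); measured faster.

-- ===== PORT A =====
def words_count (whitespace_count : Int) : Int := whitespace_count + 1

-- the for-loop with its early 'return False' and the running whitespace counter
def appropriate_field_go (chars : List Char) (whitespace_count : Int) : Bool :=
  match chars with
  | [] => decide (words_count whitespace_count < 6)
  | character :: rest =>
      if character = ',' then false
      else if character = ' ' then appropriate_field_go rest (whitespace_count + 1)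
      else appropriate_field_go rest whitespace_count

def appropriate_field (line : String) : Bool :=
  appropriate_field_go line.toList 0

-- ===== PORT B =====
-- the 'for _ in range(5)' loop: pos = line.find(' ', pos + 1); early True when find fails
def appropriate_field_alt_go (line : String) (n : Nat) (pos : Int) : Bool :=
  match n with
  | 0 => false
  | k + 1 =>
      let pos' := PySem.Str.findFrom line " " (pos + 1) none
      if pos' = -1 then true else appropriate_field_alt_go line k pos'

def appropriate_field_alt (line : String) : Bool :=
  if PySem.Str.isIn "," line then false
  else appropriate_field_alt_go line 5 (-1)

-- ===== PRECONDITION & SPEC =====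
def Spec_appropriate_field (line : String) (out : Bool) : Prop := out = appropriate_field_alt line
instance (line : String) (out : Bool) : Decidable (Spec_appropriate_field line out) := by unfold Spec_appropriate_field; infer_instance

-- ===== CLAIM (what is proved, stated in full; the proofs are below) =====
def Claim_equal_appropriate_field : Prop := ∀ (line : String), Dom_appropriate_field line → Spec_appropriate_field line (appropriate_field line)

-- ===== LEMMAS AND PROOFS =====

-- A's loop characterised: early comma rejection, else the space count decides.
theorem go_char (l : List Char) (wc : Int) :
    appropriate_field_go l wc
      = if ',' ∈ l then false else decide (wc + (l.count ' ' : Int) + 1 < 6) := by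
  induction l generalizing wc with
  | nil => simp [appropriate_field_go, words_count]
  | cons c rest ih =>
    by_cases hc : c = ','
    · simp [appropriate_field_go, hc]
    · by_cases hs : c = ' '
      · have h2 : ∀ k : Int, wc + 1 + k + 1 = wc + (k + 1) + 1 := by intro k; ring
        simp [appropriate_field_go, hs, ih, h2]
      · simp [appropriate_field_go, hc, hs, ih, Ne.symm hc]

theorem singleton_infix_iff_mem (a : Char) (l : List Char) :
    [a] <:+: l ↔ a ∈ l := by
  constructor
  · intro h
    exact h.subset (by simp)
  · intro h
    obtain ⟨s, t, rfl⟩ := List.append_of_mem h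
    exact ⟨s, t, by simp⟩

-- B's find-jump loop characterised: true iff fewer than n spaces remain after position pos.
theorem alt_go_char (line : String) (n : Nat) (pos : Int)
    (h0 : -1 ≤ pos) (h1 : (pos + 1).toNat ≤ line.toList.length) :
    appropriate_field_alt_go line n pos
      = decide ((line.toList.drop (pos + 1).toNat).count ' ' < n) := by
  induction n generalizing pos with
  | zero => simp [appropriate_field_alt_go]
  | succ n ih =>
    rw [appropriate_field_alt_go]
    have hcast : pos + 1 = (((pos + 1).toNat : Nat) : Int) :=
      (Int.toNat_of_nonneg (by omega)).symm
    have hsub : (" " : String).toList = [' '] := by decide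
    have hfind : PySem.Str.findFrom line " " (pos + 1) none
        = PySem.Chars.findFrom line.toList [' '] (((pos + 1).toNat : Nat) : Int) none := by
      rw [PySem.Str.findFrom_eq, hsub, ← hcast]
    simp only [hfind]
    set s := line.toList with hs
    set k : Nat := (pos + 1).toNat with hk
    set p := PySem.Chars.findFrom s [' '] (k : Int) none with hp
    by_cases hneg : p = -1
    · rw [if_pos hneg]
      have hnin : ¬ [' '] <:+: s.drop k :=
        (PySem.Chars.findFrom_natCast_eq_neg_one_iff s [' '] k h1).mp hneg
      have : ' ' ∉ s.drop k := by
        rw [← singleton_infix_iff_mem]; exact hnin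
      rw [List.count_eq_zero.mpr this]
      simp
    · rw [if_neg hneg]
      obtain ⟨hkp, hpre, hmin⟩ :=
        PySem.Chars.findFrom_natCast_spec s [' '] k h1 hneg
      obtain ⟨t, ht⟩ := hpre
      -- ht : [' '] ++ t = s.drop p.toNat
      have hp0 : 0 ≤ p := le_trans (by exact_mod_cast Int.natCast_nonneg k) hkp
      have hplen : p.toNat < s.length := by
        have hlen := congrArg List.length ht
        simp [List.length_drop] at hlen
        omega
      have hkle : k ≤ p.toNat := by omega
      have hdrop1 : s.drop (p.toNat + 1) = t := by
        have h2 := List.drop_eq_getElem_cons hplen (l := s)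
        rw [← ht] at h2
        injection h2 with h2a h2b
        exact h2b.symm
      have hsplit : s.drop k = (s.drop k).take (p.toNat - k) ++ (' ' :: t) := by
        conv_lhs => rw [← List.take_append_drop (p.toNat - k) (s.drop k)]
        congr 1
        rw [List.drop_drop, show k + (p.toNat - k) = p.toNat from by omega, ← ht]
        rfl
      have htake0 : ((s.drop k).take (p.toNat - k)).count ' ' = 0 := by
        rw [List.count_eq_zero]
        intro hmem
        obtain ⟨i, hilt, hgi⟩ := List.getElem_of_mem hmem
        have hi2 : i < p.toNat - k := by
          have := hilt
          simp [List.length_take, List.length_drop] at this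
          omega
        have hki : k + i < s.length := by omega
        have hgi2 : s[k + i]'hki = ' ' := by
          rw [← hgi, List.getElem_take, List.getElem_drop]
        refine hmin (k + i) (by omega) (by omega) ?_
        refine ⟨s.drop (k + i + 1), ?_⟩
        rw [List.drop_eq_getElem_cons hki, hgi2]
        rfl
      have hcount : (s.drop k).count ' ' = t.count ' ' + 1 := by
        conv_lhs => rw [hsplit]
        rw [List.count_append, htake0]
        simp
      have hp1 : (p + 1).toNat = p.toNat + 1 := by omega
      rw [ih p (by omega) (by omega)]
      rw [hp1, hdrop1, hcount]
      simp only [decide_eq_decide]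
      omega

-- ===== VERDICT (by name: the statement is the Claim_ definition above) =====
theorem appropriate_field_spec : Claim_equal_appropriate_field := by
  unfold Claim_equal_appropriate_field
  intro line _
  unfold Spec_appropriate_field appropriate_field appropriate_field_alt
  rw [go_char]
  by_cases hm : ',' ∈ line.toList
  · have h1 : PySem.Str.isIn "," line = true := by
      rw [PySem.Str.isIn_iff_infix]
      simpa [singleton_infix_iff_mem] using hm
    rw [h1, if_pos hm]
    simp
  · have h1 : PySem.Str.isIn "," line = false := by
      rw [Bool.eq_false_iff, ne_eq, PySem.Str.isIn_iff_infix]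
      simpa [singleton_infix_iff_mem] using hm
    rw [h1, if_neg hm]
    rw [alt_go_char line 5 (-1) (by omega) (by simp)]
    simp only [show ((-1 : Int) + 1).toNat = 0 by decide, List.drop_zero,
      Bool.false_eq_true, if_false, decide_eq_decide]
    omega
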